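-- pv_equiv track=rewrite | github.com/lisamiranda456/tds-project2-lisa | GA5.py | standardize_country
-- ===== SOURCE A (Python) =====
-- def standardize_country(country_abbrev):
--     country_mapping = {
--         "USA": ["USA","US","U.S.A","United States"],
--         "U.K": ["U.K","UK","United Kingdom"],
--         "Fra": ["Fra","FR","France"],
--         "Bra": ["Bra","BR","Brazil"],
--         "Ind": ["Ind","IN","India"],
--         "U.A.E":["U.A.E","United Arab Emirates","UAE","AE"]
--     }
--
--     for key, value in country_mapping.items():
--         if country_abbrev.lower() in [i.lower() for i in value]:
--             return key
--         else:
--             continue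
--
--     return country_abbrev
-- ===== SOURCE B (Python) =====
-- _COUNTRY_MAPPING = {
--     "USA": ["USA", "US", "U.S.A", "United States"],
--     "U.K": ["U.K", "UK", "United Kingdom"],
--     "Fra": ["Fra", "FR", "France"],
--     "Bra": ["Bra", "BR", "Brazil"],
--     "Ind": ["Ind", "IN", "India"],
--     "U.A.E": ["U.A.E", "United Arab Emirates", "UAE", "AE"],
-- }
--
-- # Reverse index built once: lowercased alias -> canonical key.
-- _REVERSE = {alias.lower(): key
--             for key, aliases in _COUNTRY_MAPPING.items()
--             for alias in aliases}
--
--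
-- def standardize_country(country_abbrev):
--     return _REVERSE.get(country_abbrev.lower(), country_abbrev)
-- ===== Notes on version B (the rewrite author's own statement) =====
-- stated objective: simpler
-- what changed: Replaced the per-entry loop with lowered-alias membership tests by a reverse dict (lowered alias -> canonical key) built once at module level, so the function body is a single .get with the original argument as fallback.
import Mathlib
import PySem

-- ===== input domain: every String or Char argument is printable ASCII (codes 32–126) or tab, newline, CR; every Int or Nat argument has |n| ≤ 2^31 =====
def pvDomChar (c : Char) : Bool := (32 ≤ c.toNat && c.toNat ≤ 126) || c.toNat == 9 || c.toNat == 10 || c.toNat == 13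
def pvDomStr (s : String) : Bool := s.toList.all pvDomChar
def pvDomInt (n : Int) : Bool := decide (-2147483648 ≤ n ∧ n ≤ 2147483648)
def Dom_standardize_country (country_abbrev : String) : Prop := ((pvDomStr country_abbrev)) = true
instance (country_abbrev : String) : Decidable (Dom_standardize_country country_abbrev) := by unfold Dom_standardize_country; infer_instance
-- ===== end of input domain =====

-- B replaces A's per-entry scan + membership test with a reverse index (lowered alias -> key) built once and a single lookup; objective: simpler.

-- ===== PORT A =====
-- the literal dict of A, as an insertion-ordered association list
def pvCountryMapping : List (String × List String) :=
  [("USA", ["USA", "US", "U.S.A", "United States"]),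
   ("U.K", ["U.K", "UK", "United Kingdom"]),
   ("Fra", ["Fra", "FR", "France"]),
   ("Bra", ["Bra", "BR", "Brazil"]),
   ("Ind", ["Ind", "IN", "India"]),
   ("U.A.E", ["U.A.E", "United Arab Emirates", "UAE", "AE"])]

-- the for-loop over country_mapping.items() with early return
def pvLoopA (items : List (String × List String)) (country_abbrev : String) : String :=
  match items with
  | [] => country_abbrev
  | (key, value) :: rest =>
      if PySem.Str.lower country_abbrev ∈ value.map PySem.Str.lower then key
      else pvLoopA rest country_abbrev

def standardize_country (country_abbrev : String) : String :=
  pvLoopA pvCountryMapping country_abbrev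

-- ===== PORT B =====
-- the module-level dict comprehension: {alias.lower(): key for key, aliases in mapping for alias in aliases}
def pvReverse : PySem.Dict String String :=
  (pvCountryMapping.flatMap (fun kv => kv.2.map (fun a => (PySem.Str.lower a, kv.1)))).foldl
    (fun d p => d.insert p.1 p.2) PySem.Dict.empty

def standardize_country_alt (country_abbrev : String) : String :=
  pvReverse.getD (PySem.Str.lower country_abbrev) country_abbrev

-- ===== PRECONDITION & SPEC =====
def Spec_standardize_country (country_abbrev : String) (out : String) : Prop := out = standardize_country_alt country_abbrev
instance (country_abbrev : String) (out : String) : Decidable (Spec_standardize_country country_abbrev out) := by unfold Spec_standardize_country; infer_instance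

-- ===== CLAIM (what is proved, stated in full; the proofs are below) =====
def Claim_equal_standardize_country : Prop := ∀ (country_abbrev : String), Dom_standardize_country country_abbrev → Spec_standardize_country country_abbrev (standardize_country country_abbrev)

-- ===== LEMMAS AND PROOFS =====
-- Both sides compare the same lowered input against the same lowered aliases in the same
-- order, so after unfolding the literal data the two if-chains coincide branch by branch.
set_option maxRecDepth 4000 in
lemma pvReverse_eq : pvReverse = PySem.Dict.mk
    [("usa", "USA"), ("us", "USA"), ("u.s.a", "USA"), ("united states", "USA"),
     ("u.k", "U.K"), ("uk", "U.K"), ("united kingdom", "U.K"),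
     ("fra", "Fra"), ("fr", "Fra"), ("france", "Fra"),
     ("bra", "Bra"), ("br", "Bra"), ("brazil", "Bra"),
     ("ind", "Ind"), ("in", "Ind"), ("india", "Ind"),
     ("u.a.e", "U.A.E"), ("united arab emirates", "U.A.E"), ("uae", "U.A.E"), ("ae", "U.A.E")] := by
  decide

set_option maxRecDepth 4000 in
lemma lowered_lists :
    ["USA", "US", "U.S.A", "United States"].map PySem.Str.lower = ["usa", "us", "u.s.a", "united states"] ∧
    ["U.K", "UK", "United Kingdom"].map PySem.Str.lower = ["u.k", "uk", "united kingdom"] ∧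
    ["Fra", "FR", "France"].map PySem.Str.lower = ["fra", "fr", "france"] ∧
    ["Bra", "BR", "Brazil"].map PySem.Str.lower = ["bra", "br", "brazil"] ∧
    ["Ind", "IN", "India"].map PySem.Str.lower = ["ind", "in", "india"] ∧
    ["U.A.E", "United Arab Emirates", "UAE", "AE"].map PySem.Str.lower = ["u.a.e", "united arab emirates", "uae", "ae"] := by
  decide

set_option maxRecDepth 4000 in
set_option maxHeartbeats 2000000 in
lemma both_eq (s : String) : standardize_country s = standardize_country_alt s := by
  unfold standardize_country standardize_country_alt
  rw [pvReverse_eq]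
  simp only [pvCountryMapping, pvLoopA]
  rw [lowered_lists.1, lowered_lists.2.1, lowered_lists.2.2.1, lowered_lists.2.2.2.1,
      lowered_lists.2.2.2.2.1, lowered_lists.2.2.2.2.2]
  generalize PySem.Str.lower s = t
  simp only [PySem.Dict.getD_eq_get?_getD, PySem.Dict.get?_mk_cons, List.mem_cons,
    List.not_mem_nil, or_false, beq_iff_eq]
  by_cases h0 : t = "usa"
  · simp [h0]
  by_cases h1 : t = "us"
  · simp [h1]
  by_cases h2 : t = "u.s.a"
  · simp [h2]
  by_cases h3 : t = "united states"
  · simp [h3]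
  by_cases h4 : t = "u.k"
  · simp [h4]
  by_cases h5 : t = "uk"
  · simp [h5]
  by_cases h6 : t = "united kingdom"
  · simp [h6]
  by_cases h7 : t = "fra"
  · simp [h7]
  by_cases h8 : t = "fr"
  · simp [h8]
  by_cases h9 : t = "france"
  · simp [h9]
  by_cases h10 : t = "bra"
  · simp [h10]
  by_cases h11 : t = "br"
  · simp [h11]
  by_cases h12 : t = "brazil"
  · simp [h12]
  by_cases h13 : t = "ind"
  · simp [h13]
  by_cases h14 : t = "in"
  · simp [h14]
  by_cases h15 : t = "india"
  · simp [h15]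
  by_cases h16 : t = "u.a.e"
  · simp [h16]
  by_cases h17 : t = "united arab emirates"
  · simp [h17]
  by_cases h18 : t = "uae"
  · simp [h18]
  by_cases h19 : t = "ae"
  · simp [h19]
  rw [if_neg (Ne.symm h0), if_neg (Ne.symm h1), if_neg (Ne.symm h2), if_neg (Ne.symm h3), if_neg (Ne.symm h4), if_neg (Ne.symm h5), if_neg (Ne.symm h6), if_neg (Ne.symm h7), if_neg (Ne.symm h8), if_neg (Ne.symm h9), if_neg (Ne.symm h10), if_neg (Ne.symm h11), if_neg (Ne.symm h12), if_neg (Ne.symm h13), if_neg (Ne.symm h14), if_neg (Ne.symm h15), if_neg (Ne.symm h16), if_neg (Ne.symm h17), if_neg (Ne.symm h18), if_neg (Ne.symm h19)]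
  simp [PySem.Dict.get?, h0, h1, h2, h3, h4, h5, h6, h7, h8, h9, h10, h11, h12, h13, h14, h15, h16, h17, h18, h19]

-- ===== VERDICT (by name: the statement is the Claim_ definition above) =====
theorem standardize_country_spec : Claim_equal_standardize_country := by
  intro s _
  exact both_eq s
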